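-- pv_equiv track=rewrite | github.com/geraud-g/advent-of-code | aoc_2025/day_11/day_11.py | count_paths_with_dac_and_fft
-- ===== SOURCE A (Python) =====
-- from functools import cache
--
-- def count_paths_with_dac_and_fft(
--     devices: dict[str, tuple[str, ...]], start: str, goal: str
-- ) -> int:
--     @cache
--     def count_paths_with_dac_and_fft_cached(
--         start: str, goal: str, saw_dac: bool = False, saw_fft: bool = False
--     ) -> int:
--         if start == "dac":
--             saw_dac = True
--         elif start == "fft":
--             saw_fft = True
--         if start == goal and saw_dac and saw_fft:
--             return 1
--         total = 0
--         for next_device in devices.get(start, []):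
--             total += count_paths_with_dac_and_fft_cached(
--                 next_device, goal, saw_dac, saw_fft
--             )
--         return total
--
--     return count_paths_with_dac_and_fft_cached(start, goal)
-- ===== SOURCE B (Python) =====
-- from functools import cache
--
-- def count_paths_with_dac_and_fft(
--     devices: dict[str, tuple[str, ...]], start: str, goal: str
-- ) -> int:
--     @cache
--     def paths(a: str, b: str) -> int:
--         if a == b:
--             return 1
--         return sum(paths(n, b) for n in devices.get(a, ()))
--
--     def through(x: str, y: str) -> int:
--         a = paths(start, x)
--         if a == 0:
--             return 0
--         b = paths(x, y)
--         if b == 0: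
--             return 0
--         return a * b * paths(y, goal)
--
--     return through("dac", "fft") + through("fft", "dac")
-- ===== Notes on version B (the rewrite author's own statement) =====
-- stated objective: alternative
-- what changed: Replaced the flag-carrying recursion over (node, saw_dac, saw_fft) by a memoized pairwise path counter P(a,b), composing the answer as P(start,dac)*P(dac,fft)*P(fft,goal) + P(start,fft)*P(fft,dac)*P(dac,goal), with each term short-circuited to 0 as soon as one of its first two factors is 0.
-- outside the precondition, e.g. on count_paths_with_dac_and_fft({'dac': ('fft',), 'fft': ('dac',)}, 'dac', 'dac'): A returns 1, B returns 2
import Mathlib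
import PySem

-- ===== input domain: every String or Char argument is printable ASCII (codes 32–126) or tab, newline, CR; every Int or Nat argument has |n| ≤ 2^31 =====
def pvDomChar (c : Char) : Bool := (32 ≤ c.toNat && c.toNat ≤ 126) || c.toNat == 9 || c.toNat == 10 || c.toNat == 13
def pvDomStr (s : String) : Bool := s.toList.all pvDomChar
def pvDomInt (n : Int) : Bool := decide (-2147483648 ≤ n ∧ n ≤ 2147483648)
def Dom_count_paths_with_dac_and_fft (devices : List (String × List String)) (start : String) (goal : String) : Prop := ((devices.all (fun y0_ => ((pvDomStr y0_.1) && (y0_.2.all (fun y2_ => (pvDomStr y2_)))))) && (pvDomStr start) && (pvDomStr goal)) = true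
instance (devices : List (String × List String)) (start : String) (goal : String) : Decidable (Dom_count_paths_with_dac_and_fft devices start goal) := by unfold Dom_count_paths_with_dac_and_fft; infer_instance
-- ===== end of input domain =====

-- B replaces A's (node, saw_dac, saw_fft) flag-carrying recursion by a pairwise path
-- counter P(a,b), composed as P(s,dac)·P(dac,fft)·P(fft,g) + P(s,fft)·P(fft,dac)·P(dac,g)
-- with each term short-circuited to 0 when an earlier factor is 0
-- (objective: alternative decomposition, same cost).

-- ===== PORT A =====
-- devices.get(key, [])  (dict → assoc list, first-match lookup)
def pvGetD (devices : List (String × List String)) (key : String) : List String :=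
  PySem.Dict.getD (PySem.Dict.mk devices) key []

-- count_paths_with_dac_and_fft_cached; the Nat argument is a totality fuel only
-- (Python's recursion is unbounded; under Pre_ the fuel is never exhausted).
def pvCPA (devices : List (String × List String)) (goal : String) :
    Nat → String → Bool → Bool → Int
  | 0, start, saw_dac0, saw_fft0 =>
    -- if start == "dac": saw_dac = True  elif start == "fft": saw_fft = True
    let saw_dac := if start = "dac" then true else saw_dac0
    let saw_fft := if start = "dac" then saw_fft0 else if start = "fft" then true else saw_fft0
    if start = goal ∧ saw_dac = true ∧ saw_fft = true then 1 else 0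
  | f + 1, start, saw_dac0, saw_fft0 =>
    let saw_dac := if start = "dac" then true else saw_dac0
    let saw_fft := if start = "dac" then saw_fft0 else if start = "fft" then true else saw_fft0
    if start = goal ∧ saw_dac = true ∧ saw_fft = true then 1
    else (pvGetD devices start).foldl
      (fun total next_device => total + pvCPA devices goal f next_device saw_dac saw_fft) 0

def count_paths_with_dac_and_fft (devices : List (String × List String)) (start : String) (goal : String) : Int :=
  pvCPA devices goal (devices.length + 1) start false false

-- ===== PORT B =====
-- paths(a, b) from Source B; the Nat argument is a totality fuel only.
def pvP (devices : List (String × List String)) : Nat → String → String → Int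
  | 0, a, b => if a = b then 1 else 0
  | f + 1, a, b =>
    if a = b then 1
    else ((pvGetD devices a).map (fun n => pvP devices f n b)).sum

-- through(x, y) from Source B
def pvThrough (devices : List (String × List String)) (f : Nat) (start goal x y : String) : Int :=
  let a := pvP devices f start x
  if a = 0 then 0
  else
    let b := pvP devices f x y
    if b = 0 then 0
    else a * b * pvP devices f y goal

def count_paths_with_dac_and_fft_alt (devices : List (String × List String)) (start : String) (goal : String) : Int :=
  let f := devices.length + 1
  pvThrough devices f start goal "dac" "fft" + pvThrough devices f start goal "fft" "dac"

-- ===== PRECONDITION & SPEC =====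
-- endpoints of walks of length k out of a node (deduplicated frontier)
def pvStep (devices : List (String × List String)) (frontier : List String) : List String :=
  (frontier.flatMap (pvGetD devices)).dedup

def pvLevels (devices : List (String × List String)) : Nat → String → List String
  | 0, a => [a]
  | k + 1, a => pvStep devices (pvLevels devices k a)

-- Pre_ excludes inputs with a cycle reachable from start (witnessed by a walk of length
-- len(devices)+1): there the recursion on walks out of start is unbounded — A raises
-- RecursionError, except when every infinite branch is cut by reaching goal with both
-- flags set, where the set of start→goal paths through dac and fft is infinite and A's
-- finite count is an artefact of that early stop (B raises or counts path segments there).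
def Pre_count_paths_with_dac_and_fft (devices : List (String × List String)) (start : String) (goal : String) : Prop :=
  pvLevels devices (devices.length + 1) start = []

instance (devices : List (String × List String)) (start : String) (goal : String) : Decidable (Pre_count_paths_with_dac_and_fft devices start goal) := by
  unfold Pre_count_paths_with_dac_and_fft; infer_instance

def pvWitness_count_paths_with_dac_and_fft : (List (String × List String)) × String × String :=
  ([("s", ["dac"]), ("dac", ["fft"]), ("fft", ["g"])], "s", "g")

def Spec_count_paths_with_dac_and_fft (devices : List (String × List String)) (start : String) (goal : String) (out : Int) : Prop := out = count_paths_with_dac_and_fft_alt devices start goal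
instance (devices : List (String × List String)) (start : String) (goal : String) (out : Int) : Decidable (Spec_count_paths_with_dac_and_fft devices start goal out) := by unfold Spec_count_paths_with_dac_and_fft; infer_instance

-- ===== CLAIM (what is proved, stated in full; the proofs are below) =====
def Claim_equal_count_paths_with_dac_and_fft : Prop := ∀ (devices : List (String × List String)) (start : String) (goal : String), Dom_count_paths_with_dac_and_fft devices start goal → Pre_count_paths_with_dac_and_fft devices start goal → Spec_count_paths_with_dac_and_fft devices start goal (count_paths_with_dac_and_fft devices start goal)

-- ===== LEMMAS AND PROOFS =====

-- walks in the devices graph: pvWalk d k a b ⟺ there is a walk of length k from a to b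
def pvWalk (devices : List (String × List String)) : Nat → String → String → Prop
  | 0, a, b => a = b
  | k + 1, a, b => ∃ y, pvWalk devices k a y ∧ b ∈ pvGetD devices y

-- every walk out of a has length ≤ K
def pvBnd (devices : List (String × List String)) (a : String) (K : Nat) : Prop :=
  ∀ k b, pvWalk devices k a b → k ≤ K

theorem pvWalk_cons {d : List (String × List String)} {a m : String} {k : Nat} {b : String}
    (hm : m ∈ pvGetD d a) (h : pvWalk d k m b) : pvWalk d (k + 1) a b := by
  induction k generalizing b with
  | zero => cases h; exact ⟨a, rfl, hm⟩
  | succ k ih =>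
    obtain ⟨y, hy, hb⟩ := h
    exact ⟨y, ih hy, hb⟩

theorem pvWalk_concat {d : List (String × List String)} {a b c : String} {i j : Nat}
    (h1 : pvWalk d i a b) (h2 : pvWalk d j b c) : pvWalk d (i + j) a c := by
  induction j generalizing c with
  | zero => cases h2; exact h1
  | succ j ih =>
    obtain ⟨y, hy, hc⟩ := h2
    exact ⟨y, ih hy, hc⟩

theorem pvWalk_prefix {d : List (String × List String)} {a : String} :
    ∀ (j i : Nat) (b : String), pvWalk d (i + j) a b → ∃ c, pvWalk d i a c := by
  intro j
  induction j with
  | zero => intro i b h; exact ⟨b, h⟩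
  | succ j ih =>
    intro i b h
    obtain ⟨y, hy, _⟩ := (show pvWalk d (i + j + 1) a b by simpa [Nat.add_assoc] using h)
    exact ih i y hy

theorem pvMem_levels {d : List (String × List String)} :
    ∀ (k : Nat) (a x : String), x ∈ pvLevels d k a ↔ pvWalk d k a x := by
  intro k
  induction k with
  | zero => intro a x; simp [pvLevels, pvWalk, eq_comm]
  | succ k ih =>
    intro a x
    simp [pvLevels, pvStep, List.mem_dedup, List.mem_flatMap, ih, pvWalk]

theorem pvBnd_of_levels {d : List (String × List String)} {a : String} {N : Nat}
    (hN : 1 ≤ N) (h : pvLevels d N a = []) : pvBnd d a (N - 1) := by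
  intro k b hw
  by_contra hk
  have hNk : N ≤ k := by omega
  have : pvWalk d (N + (k - N)) a b := by
    have : N + (k - N) = k := by omega
    rw [this]; exact hw
  obtain ⟨c, hc⟩ := pvWalk_prefix (k - N) N b this
  have := (pvMem_levels N a c).2 hc
  rw [h] at this
  exact absurd this (List.not_mem_nil)

theorem pvBnd_succ {d : List (String × List String)} {a : String} {K : Nat}
    (h : pvBnd d a (K + 1)) {m : String} (hm : m ∈ pvGetD d a) : pvBnd d m K := by
  intro k b hw
  have := h (k + 1) b (pvWalk_cons hm hw)
  omega

theorem pvBnd_zero_nil {d : List (String × List String)} {a : String}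
    (h : pvBnd d a 0) : pvGetD d a = [] := by
  cases hE : pvGetD d a with
  | nil => rfl
  | cons m t =>
    have hw : pvWalk d 1 a m := ⟨a, rfl, by rw [hE]; exact List.mem_cons_self⟩
    have := h 1 m hw
    omega

theorem pvP_self {d : List (String × List String)} {a : String} (f : Nat) : pvP d f a a = 1 := by
  cases f <;> simp [pvP]

theorem pvP_nil {d : List (String × List String)} {a b : String} (hab : a ≠ b)
    (hE : pvGetD d a = []) (f : Nat) : pvP d f a b = 0 := by
  cases f <;> simp [pvP, hab, hE]

theorem pvP_stab {d : List (String × List String)} {b : String} :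
    ∀ (K : Nat) (a : String) (f : Nat), pvBnd d a K → K ≤ f → pvP d f a b = pvP d K a b := by
  intro K
  induction K with
  | zero =>
    intro a f hb _
    by_cases hab : a = b
    · subst hab; rw [pvP_self, pvP_self]
    · rw [pvP_nil hab (pvBnd_zero_nil hb), pvP_nil hab (pvBnd_zero_nil hb)]
  | succ K ih =>
    intro a f hb hf
    by_cases hab : a = b
    · subst hab; rw [pvP_self, pvP_self]
    · obtain ⟨f', rfl⟩ : ∃ f', f = f' + 1 := ⟨f - 1, by omega⟩
      simp only [pvP, if_neg hab]
      congr 1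
      apply List.map_congr_left
      intro m hm
      exact ih m f' (pvBnd_succ hb hm) (by omega)

theorem pvP_stab2 {d : List (String × List String)} {b a : String} {K f1 f2 : Nat}
    (hb : pvBnd d a K) (h1 : K ≤ f1) (h2 : K ≤ f2) : pvP d f1 a b = pvP d f2 a b := by
  rw [pvP_stab K a f1 hb h1, pvP_stab K a f2 hb h2]

theorem pvP_pos {d : List (String × List String)} {b : String} :
    ∀ (f : Nat) (a : String), pvP d f a b ≠ 0 →
      ∃ k, pvWalk d k a b ∧ (a ≠ b → 1 ≤ k) := by
  intro f
  induction f with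
  | zero =>
    intro a h
    by_cases hab : a = b
    · exact ⟨0, hab, fun hc => absurd hab hc⟩
    · simp [pvP, hab] at h
  | succ f ih =>
    intro a h
    by_cases hab : a = b
    · exact ⟨0, hab, fun hc => absurd hab hc⟩
    · simp only [pvP, if_neg hab] at h
      have : ∃ m ∈ pvGetD d a, pvP d f m b ≠ 0 := by
        by_contra hall
        push Not at hall
        exact h (List.sum_eq_zero (by
          intro x hx
          obtain ⟨m, hm, rfl⟩ := List.mem_map.1 hx
          exact hall m hm))
      obtain ⟨m, hm, hne⟩ := this
      obtain ⟨k, hw, _⟩ := ih m hne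
      exact ⟨k + 1, pvWalk_cons hm hw, fun _ => by omega⟩

theorem pvWalk_iter {d : List (String × List String)} {a : String} {p : Nat}
    (h : pvWalk d p a a) : ∀ m : Nat, pvWalk d (m * p) a a := by
  intro m
  induction m with
  | zero =>
    have h0 : 0 * p = 0 := Nat.zero_mul p
    rw [h0]
    exact rfl
  | succ m ih =>
    have := pvWalk_concat ih h
    simpa [Nat.succ_mul] using this

-- if dac is reachable from start and all walks from start are bounded, dac and fft
-- cannot lie on a common cycle
theorem pvMutual_zero {d : List (String × List String)} {start : String} {K p F : Nat}
    (hb : pvBnd d start K) (hw : pvWalk d p start "dac") :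
    pvP d F "dac" "fft" * pvP d F "fft" "dac" = 0 := by
  by_contra h
  have h1 : pvP d F "dac" "fft" ≠ 0 := fun hz => h (by rw [hz, zero_mul])
  have h2 : pvP d F "fft" "dac" ≠ 0 := fun hz => h (by rw [hz, mul_zero])
  obtain ⟨i, hwi, hi⟩ := pvP_pos F "dac" h1
  obtain ⟨j, hwj, hj⟩ := pvP_pos F "fft" h2
  have hi1 : 1 ≤ i := hi (by decide)
  have hcyc : pvWalk d (i + j) "dac" "dac" := pvWalk_concat hwi hwj
  have hiter := pvWalk_iter hcyc (K + 1)
  have hlong : pvWalk d (p + (K + 1) * (i + j)) start "dac" := pvWalk_concat hw hiter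
  have := hb (p + (K + 1) * (i + j)) "dac" hlong
  have : K + 1 ≤ (K + 1) * (i + j) := Nat.le_mul_of_pos_right (K + 1) (by omega)
  omega

-- sum/foldl algebra
theorem pvSum_map_mul_const (l : List String) (h : String → Int) (c : Int) :
    (l.map (fun x => h x * c)).sum = (l.map h).sum * c := by
  induction l with
  | nil => simp
  | cons x t ih => simp [ih, add_mul]

theorem pvSum_map_add2 (l : List String) (h1 h2 : String → Int) :
    (l.map (fun x => h1 x + h2 x)).sum = (l.map h1).sum + (l.map h2).sum := by
  induction l with
  | nil => simp
  | cons x t ih => simp [ih]; ring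

theorem pvFoldl_sum (l : List String) (h : String → Int) :
    l.foldl (fun total x => total + h x) 0 = (l.map h).sum := by
  rw [PySem.List.foldl_add]
  simp

-- the short-circuited term equals the plain product (each guard only skips a factor
-- that would have multiplied the product to 0 anyway)
theorem pvThrough_eq (d : List (String × List String)) (f : Nat) (s g x y : String) :
    pvThrough d f s g x y = pvP d f s x * (pvP d f x y * pvP d f y g) := by
  unfold pvThrough
  by_cases ha : pvP d f s x = 0
  · simp [ha]
  · by_cases hb : pvP d f x y = 0
    · simp [ha, hb]
    · simp [ha, hb]; ring

-- if dac is unreachable from n, A's recursion with saw_dac = False returns 0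
theorem pvCPA_no_dac {d : List (String × List String)} {g : String} :
    ∀ (f : Nat) (n : String) (sf : Bool), (∀ k, ¬ pvWalk d k n "dac") →
      pvCPA d g f n false sf = 0 := by
  intro f
  induction f with
  | zero =>
    intro n sf h
    have hn : n ≠ "dac" := fun he => h 0 he
    simp [pvCPA, hn]
  | succ f ih =>
    intro n sf h
    have hn : n ≠ "dac" := fun he => h 0 he
    simp only [pvCPA, if_neg hn]
    rw [if_neg (by simp)]
    rw [pvFoldl_sum]
    apply List.sum_eq_zero
    intro x hx
    obtain ⟨m, hm, rfl⟩ := List.mem_map.1 hx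
    exact ih m _ (fun k hk => h (k + 1) (pvWalk_cons hm hk))

-- if fft is unreachable from n, A's recursion with saw_fft = False returns 0
theorem pvCPA_no_fft {d : List (String × List String)} {g : String} :
    ∀ (f : Nat) (n : String) (sd : Bool), (∀ k, ¬ pvWalk d k n "fft") →
      pvCPA d g f n sd false = 0 := by
  intro f
  induction f with
  | zero =>
    intro n sd h
    have hn : n ≠ "fft" := fun he => h 0 he
    by_cases hnd : n = "dac" <;> simp [pvCPA, hn, hnd]
  | succ f ih =>
    intro n sd h
    have hn : n ≠ "fft" := fun he => h 0 he
    by_cases hnd : n = "dac"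
    · subst hnd
      simp only [pvCPA]
      rw [if_neg (by simp)]
      rw [pvFoldl_sum]
      apply List.sum_eq_zero
      intro x hx
      obtain ⟨m, hm, rfl⟩ := List.mem_map.1 hx
      exact ih m _ (fun k hk => h (k + 1) (pvWalk_cons hm hk))
    · simp only [pvCPA, if_neg hnd, if_neg hn]
      rw [if_neg (by simp)]
      rw [pvFoldl_sum]
      apply List.sum_eq_zero
      intro x hx
      obtain ⟨m, hm, rfl⟩ := List.mem_map.1 hx
      exact ih m _ (fun k hk => h (k + 1) (pvWalk_cons hm hk))

-- A with both flags set is exactly the pairwise counter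
theorem pvCPA_TT {d : List (String × List String)} {g : String} :
    ∀ (f : Nat) (n : String), pvCPA d g f n true true = pvP d f n g := by
  intro f
  induction f with
  | zero =>
    intro n
    by_cases hng : n = g <;> simp [pvCPA, pvP, hng]
  | succ f ih =>
    intro n
    by_cases hng : n = g
    · simp [pvCPA, pvP, hng]
    · simp only [pvCPA, pvP, if_neg hng]
      simp only [ite_self]
      rw [if_neg (by simp [hng])]
      rw [pvFoldl_sum]
      simp [ih]

theorem pvCPA_fft_TF {d : List (String × List String)} {g : String} :
    ∀ f : Nat, pvCPA d g f "fft" true false = pvP d f "fft" g := by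
  intro f
  cases f with
  | zero => simp [pvCPA, pvP]
  | succ f => simp [pvCPA, pvP, pvFoldl_sum, pvCPA_TT]

theorem pvCPA_dac_FT {d : List (String × List String)} {g : String} :
    ∀ f : Nat, pvCPA d g f "dac" false true = pvP d f "dac" g := by
  intro f
  cases f with
  | zero => simp [pvCPA, pvP]
  | succ f => simp [pvCPA, pvP, pvFoldl_sum, pvCPA_TT]

-- A with saw_dac already set: paths to fft times paths fft→goal
theorem pvCPA_TF {d : List (String × List String)} {g : String} :
    ∀ (K : Nat) (n : String) (f F : Nat), pvBnd d n K → K ≤ f → K ≤ F →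
      pvCPA d g f n true false = pvP d F n "fft" * pvP d F "fft" g := by
  intro K
  induction K with
  | zero =>
    intro n f F hb _ _
    by_cases hn : n = "fft"
    · subst hn
      rw [pvCPA_fft_TF, pvP_self, one_mul]
      exact pvP_stab2 hb (Nat.zero_le f) (Nat.zero_le F)
    · have hE := pvBnd_zero_nil hb
      rw [pvP_nil hn hE, zero_mul]
      cases f with
      | zero => simp [pvCPA, hn]
      | succ f => simp [pvCPA, hn, hE]
  | succ K ih =>
    intro n f F hb hf hF
    by_cases hn : n = "fft"
    · subst hn
      rw [pvCPA_fft_TF, pvP_self, one_mul]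
      exact pvP_stab2 hb hf hF
    · obtain ⟨f', rfl⟩ : ∃ f', f = f' + 1 := ⟨f - 1, by omega⟩
      obtain ⟨F', rfl⟩ : ∃ F', F = F' + 1 := ⟨F - 1, by omega⟩
      simp [pvCPA, hn, pvFoldl_sum]
      have hmap : ((pvGetD d n).map (fun m => pvCPA d g f' m true false))
          = (pvGetD d n).map (fun m => pvP d (F' + 1) m "fft" * pvP d (F' + 1) "fft" g) := by
        apply List.map_congr_left
        intro m hm
        exact ih m f' (F' + 1) (pvBnd_succ hb hm) (by omega) (by omega)
      have hfac : ((pvGetD d n).map (fun m => pvP d (F' + 1) m "fft")).sum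
          = pvP d (F' + 1) n "fft" := by
        have h1 : pvP d (F' + 1) n "fft" = ((pvGetD d n).map (fun m => pvP d F' m "fft")).sum :=
          if_neg hn
        rw [h1]
        apply congrArg
        apply List.map_congr_left
        intro m hm
        exact pvP_stab2 (pvBnd_succ hb hm) (by omega) (by omega)
      rw [hmap, pvSum_map_mul_const, hfac]

theorem pvCPA_FT {d : List (String × List String)} {g : String} :
    ∀ (K : Nat) (n : String) (f F : Nat), pvBnd d n K → K ≤ f → K ≤ F →
      pvCPA d g f n false true = pvP d F n "dac" * pvP d F "dac" g := by
  intro K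
  induction K with
  | zero =>
    intro n f F hb _ _
    by_cases hn : n = "dac"
    · subst hn
      rw [pvCPA_dac_FT, pvP_self, one_mul]
      exact pvP_stab2 hb (Nat.zero_le f) (Nat.zero_le F)
    · have hE := pvBnd_zero_nil hb
      rw [pvP_nil hn hE, zero_mul]
      cases f with
      | zero => simp [pvCPA, hn]
      | succ f => simp [pvCPA, hn, hE]
  | succ K ih =>
    intro n f F hb hf hF
    by_cases hn : n = "dac"
    · subst hn
      rw [pvCPA_dac_FT, pvP_self, one_mul]
      exact pvP_stab2 hb hf hF
    · obtain ⟨f', rfl⟩ : ∃ f', f = f' + 1 := ⟨f - 1, by omega⟩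
      obtain ⟨F', rfl⟩ : ∃ F', F = F' + 1 := ⟨F - 1, by omega⟩
      simp [pvCPA, hn, pvFoldl_sum]
      have hmap : ((pvGetD d n).map (fun m => pvCPA d g f' m false true))
          = (pvGetD d n).map (fun m => pvP d (F' + 1) m "dac" * pvP d (F' + 1) "dac" g) := by
        apply List.map_congr_left
        intro m hm
        exact ih m f' (F' + 1) (pvBnd_succ hb hm) (by omega) (by omega)
      have hfac : ((pvGetD d n).map (fun m => pvP d (F' + 1) m "dac")).sum
          = pvP d (F' + 1) n "dac" := by
        have h1 : pvP d (F' + 1) n "dac" = ((pvGetD d n).map (fun m => pvP d F' m "dac")).sum :=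
          if_neg hn
        rw [h1]
        apply congrArg
        apply List.map_congr_left
        intro m hm
        exact pvP_stab2 (pvBnd_succ hb hm) (by omega) (by omega)
      rw [hmap, pvSum_map_mul_const, hfac]

theorem pvCPA_FF {d : List (String × List String)} {g : String} :
    ∀ (K : Nat) (n : String) (f F : Nat), pvBnd d n K → K ≤ f → K ≤ F →
      pvP d F "dac" "fft" * pvP d F "fft" "dac" = 0 →
      pvCPA d g f n false false
        = pvP d F n "dac" * (pvP d F "dac" "fft" * pvP d F "fft" g)
          + pvP d F n "fft" * (pvP d F "fft" "dac" * pvP d F "dac" g) := by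
  intro K
  induction K with
  | zero =>
    intro n f F hb _ _ _
    have hE := pvBnd_zero_nil hb
    have hL : pvCPA d g f n false false = 0 := by
      by_cases hnd : n = "dac"
      · subst hnd; cases f <;> simp [pvCPA, hE]
      · by_cases hnf : n = "fft"
        · subst hnf; cases f <;> simp [pvCPA, hnd, hE]
        · cases f <;> simp [pvCPA, hnd, hnf, hE]
    rw [hL]
    by_cases hnd : n = "dac"
    · subst hnd
      rw [pvP_nil (show ("dac" : String) ≠ "fft" by decide) hE]
      ring
    · by_cases hnf : n = "fft"
      · subst hnf
        rw [pvP_nil (show ("fft" : String) ≠ "dac" by decide) hE]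
        ring
      · rw [pvP_nil hnd hE, pvP_nil hnf hE]
        ring
  | succ K ih =>
    intro n f F hb hf hF hmut
    obtain ⟨f', rfl⟩ : ∃ f', f = f' + 1 := ⟨f - 1, by omega⟩
    obtain ⟨F', rfl⟩ : ∃ F', F = F' + 1 := ⟨F - 1, by omega⟩
    by_cases hnd : n = "dac"
    · subst hnd
      -- children run with flags (true, false)
      simp [pvCPA, pvFoldl_sum]
      have hmap : ((pvGetD d "dac").map (fun m => pvCPA d g f' m true false))
          = (pvGetD d "dac").map (fun m => pvP d (F' + 1) m "fft" * pvP d (F' + 1) "fft" g) := by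
        apply List.map_congr_left
        intro m hm
        exact pvCPA_TF K m f' (F' + 1) (pvBnd_succ hb hm) (by omega) (by omega)
      have hfac : ((pvGetD d "dac").map (fun m => pvP d (F' + 1) m "fft")).sum
          = pvP d (F' + 1) "dac" "fft" := by
        have h1 : pvP d (F' + 1) "dac" "fft"
            = ((pvGetD d "dac").map (fun m => pvP d F' m "fft")).sum :=
          if_neg (by decide)
        rw [h1]
        apply congrArg
        apply List.map_congr_left
        intro m hm
        exact pvP_stab2 (pvBnd_succ hb hm) (by omega) (by omega)
      rw [hmap, pvSum_map_mul_const, hfac, pvP_self, one_mul]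
      have hz : pvP d (F' + 1) "dac" "fft" * (pvP d (F' + 1) "fft" "dac" * pvP d (F' + 1) "dac" g) = 0 := by
        rw [← mul_assoc, hmut, zero_mul]
      rw [hz, add_zero]
    · by_cases hnf : n = "fft"
      · subst hnf
        -- children run with flags (false, true)
        simp [pvCPA, pvFoldl_sum]
        have hmap : ((pvGetD d "fft").map (fun m => pvCPA d g f' m false true))
            = (pvGetD d "fft").map (fun m => pvP d (F' + 1) m "dac" * pvP d (F' + 1) "dac" g) := by
          apply List.map_congr_left
          intro m hm
          exact pvCPA_FT K m f' (F' + 1) (pvBnd_succ hb hm) (by omega) (by omega)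
        have hfac : ((pvGetD d "fft").map (fun m => pvP d (F' + 1) m "dac")).sum
            = pvP d (F' + 1) "fft" "dac" := by
          have h1 : pvP d (F' + 1) "fft" "dac"
              = ((pvGetD d "fft").map (fun m => pvP d F' m "dac")).sum :=
            if_neg (by decide)
          rw [h1]
          apply congrArg
          apply List.map_congr_left
          intro m hm
          exact pvP_stab2 (pvBnd_succ hb hm) (by omega) (by omega)
        rw [hmap, pvSum_map_mul_const, hfac, pvP_self, one_mul]
        have hz : pvP d (F' + 1) "fft" "dac" * (pvP d (F' + 1) "dac" "fft" * pvP d (F' + 1) "fft" g) = 0 := by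
          rw [← mul_assoc, mul_comm (pvP d (F' + 1) "fft" "dac"), hmut, zero_mul]
        rw [hz, zero_add]
      · -- children keep flags (false, false)
        simp [pvCPA, hnd, hnf, pvFoldl_sum]
        have hmap : ((pvGetD d n).map (fun m => pvCPA d g f' m false false))
            = (pvGetD d n).map (fun m =>
                pvP d (F' + 1) m "dac" * (pvP d (F' + 1) "dac" "fft" * pvP d (F' + 1) "fft" g)
                + pvP d (F' + 1) m "fft" * (pvP d (F' + 1) "fft" "dac" * pvP d (F' + 1) "dac" g)) := by
          apply List.map_congr_left
          intro m hm
          exact ih m f' (F' + 1) (pvBnd_succ hb hm) (by omega) (by omega) hmut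
        have hfac1 : ((pvGetD d n).map (fun m => pvP d (F' + 1) m "dac")).sum
            = pvP d (F' + 1) n "dac" := by
          have h1 : pvP d (F' + 1) n "dac"
              = ((pvGetD d n).map (fun m => pvP d F' m "dac")).sum :=
            if_neg hnd
          rw [h1]
          apply congrArg
          apply List.map_congr_left
          intro m hm
          exact pvP_stab2 (pvBnd_succ hb hm) (by omega) (by omega)
        have hfac2 : ((pvGetD d n).map (fun m => pvP d (F' + 1) m "fft")).sum
            = pvP d (F' + 1) n "fft" := by
          have h1 : pvP d (F' + 1) n "fft"
              = ((pvGetD d n).map (fun m => pvP d F' m "fft")).sum :=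
            if_neg hnf
          rw [h1]
          apply congrArg
          apply List.map_congr_left
          intro m hm
          exact pvP_stab2 (pvBnd_succ hb hm) (by omega) (by omega)
        rw [hmap, pvSum_map_add2, pvSum_map_mul_const, pvSum_map_mul_const, hfac1, hfac2]

-- ===== VERDICT (by name: the statement is the Claim_ definition above) =====
theorem count_paths_with_dac_and_fft_spec : Claim_equal_count_paths_with_dac_and_fft := by
  intro devices start goal _ hpre
  unfold Pre_count_paths_with_dac_and_fft at hpre
  unfold Spec_count_paths_with_dac_and_fft
  unfold count_paths_with_dac_and_fft count_paths_with_dac_and_fft_alt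
  simp only []
  set N := devices.length + 1 with hNdef
  have hN : 1 ≤ N := by omega
  have hb : pvBnd devices start (N - 1) := pvBnd_of_levels hN hpre
  rw [pvThrough_eq, pvThrough_eq]
  by_cases hwd : ∃ k, pvWalk devices k start "dac"
  · by_cases hwf : ∃ k, pvWalk devices k start "fft"
    · -- both reachable: mutual cycle impossible, main simulation lemma applies
      obtain ⟨p, hp⟩ := hwd
      have hmut := pvMutual_zero (F := N) hb hp
      have := pvCPA_FF (g := goal) (N - 1) start N N hb (by omega) (by omega) hmut
      rw [this]
    · -- fft unreachable from start: A = 0 and both products vanish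
      have hA : pvCPA devices goal N start false false = 0 :=
        pvCPA_no_fft N start false (fun k hk => hwf ⟨k, hk⟩)
      have hq1' : pvP devices N start "fft" = 0 := by
        by_contra hq
        obtain ⟨k, hk, _⟩ := pvP_pos N start hq
        exact hwf ⟨k, hk⟩
      have hq2 : pvP devices N "dac" "fft" = 0 := by
        by_contra hq
        obtain ⟨j, hj, _⟩ := pvP_pos N "dac" hq
        obtain ⟨p, hp⟩ := hwd
        exact hwf ⟨p + j, pvWalk_concat hp hj⟩
      rw [hA, hq1', hq2]
      ring
  · -- dac unreachable from start: A = 0 and both products vanish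
    have hA : pvCPA devices goal N start false false = 0 :=
      pvCPA_no_dac N start false (fun k hk => hwd ⟨k, hk⟩)
    have hq1 : pvP devices N start "dac" = 0 := by
      by_contra hq
      obtain ⟨k, hk, _⟩ := pvP_pos N start hq
      exact hwd ⟨k, hk⟩
    by_cases hwf : ∃ k, pvWalk devices k start "fft"
    · have hq2' : pvP devices N "fft" "dac" = 0 := by
        by_contra hq
        obtain ⟨j, hj, _⟩ := pvP_pos N "fft" hq
        obtain ⟨p, hp⟩ := hwf
        exact hwd ⟨p + j, pvWalk_concat hp hj⟩
      rw [hA, hq1, hq2']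
      ring
    · have hq1' : pvP devices N start "fft" = 0 := by
        by_contra hq
        obtain ⟨k, hk, _⟩ := pvP_pos N start hq
        exact hwf ⟨k, hk⟩
      rw [hA, hq1, hq1']
      ring
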